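-- pv_equiv track=rewrite | github.com/chrisesposito92/sports-analytics-pipeline | src/data/generate_sample_data.py | generate_teams
-- ===== SOURCE A (Python) =====
-- def generate_teams(num_teams=10):
--     """Generate a list of team names.
--
--     Args:
--         num_teams: Number of teams to generate
--
--     Returns:
--         List of team names
--     """
--     team_names = [
--         "Bucks", "Celtics", "76ers", "Raptors", "Nets",
--         "Nuggets", "Trail Blazers", "Thunder", "Jazz", "Rockets",
--         "Lakers", "Clippers", "Kings", "Spurs", "Timberwolves",
--         "Warriors", "Pelicans", "Mavericks", "Grizzlies", "Suns"
--     ]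
--
--     # Select a subset of teams if needed
--     if num_teams <= len(team_names):
--         return team_names[:num_teams]
--     else:
--         # If more teams are requested than available, add numbered teams
--         additional_teams = [f"Team {i+1}" for i in range(len(team_names), num_teams)]
--         return team_names + additional_teams
-- ===== SOURCE B (Python) =====
-- def generate_teams(num_teams=10):
--     """Generate a list of team names.
--
--     Single pass: the i-th team name is computed directly from its index
--     (preset name while presets last, numbered name after), so no list
--     concatenation or slicing is needed.
--     """
--     preset = [
--         "Bucks", "Celtics", "76ers", "Raptors", "Nets",
--         "Nuggets", "Trail Blazers", "Thunder", "Jazz", "Rockets",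
--         "Lakers", "Clippers", "Kings", "Spurs", "Timberwolves",
--         "Warriors", "Pelicans", "Mavericks", "Grizzlies", "Suns"
--     ]
--     return [preset[i] if i < len(preset) else f"Team {i+1}"
--             for i in range(num_teams)]
-- ===== Notes on version B (the rewrite author's own statement) =====
-- stated objective: alternative
-- what changed: Instead of branching between a slice of the preset list and a concatenation with a generated suffix, B computes the i-th name directly from its index in one range(num_teams) pass (preset[i] while i < 20, else a numbered name).
-- intended difference: For -20 < num_teams < 0, A's team_names[:num_teams] trims from the end via Python's negative-slice rule and returns the first 20+num_teams preset names, while B returns [] -- the intended result, since a negative count of teams to generate means no teams. — e.g. on generate_teams(-3): A returns ["Bucks", "Celtics", "76ers", "Raptors", "Nets", "Nuggets", "Trail Blazers", "Thunder", "Jazz", "Rockets", "Lakers", "C…, B returns []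
import Mathlib
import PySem

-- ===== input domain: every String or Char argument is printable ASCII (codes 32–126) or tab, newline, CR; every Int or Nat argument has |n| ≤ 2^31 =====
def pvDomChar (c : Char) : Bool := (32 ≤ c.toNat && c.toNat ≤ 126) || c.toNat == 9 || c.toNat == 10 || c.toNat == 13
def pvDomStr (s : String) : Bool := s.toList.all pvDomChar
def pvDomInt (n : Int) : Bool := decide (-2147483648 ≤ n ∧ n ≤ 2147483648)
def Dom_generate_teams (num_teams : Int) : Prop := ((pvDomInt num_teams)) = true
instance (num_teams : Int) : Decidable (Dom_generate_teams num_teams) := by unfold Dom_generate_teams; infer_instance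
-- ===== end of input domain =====

-- B computes the i-th name directly from its index in one pass (objective: alternative);
-- on -20 < num_teams < 0 A's negative-slice artefact and B's empty list differ (see D_ below).

def pvTeamNames : List String :=
  ["Bucks", "Celtics", "76ers", "Raptors", "Nets",
   "Nuggets", "Trail Blazers", "Thunder", "Jazz", "Rockets",
   "Lakers", "Clippers", "Kings", "Spurs", "Timberwolves",
   "Warriors", "Pelicans", "Mavericks", "Grizzlies", "Suns"]

-- ===== PORT A =====
def generate_teams (num_teams : Int) : List String :=
  let team_names := pvTeamNames
  if num_teams ≤ (team_names.length : Int) then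
    PySem.List.slice team_names none (some num_teams)
  else
    let additional_teams :=
      (PySem.List.pyRange (team_names.length : Int) num_teams 1).map
        (fun i => "Team " ++ PySem.Int.toStr (i + 1))
    team_names ++ additional_teams

-- ===== PORT B =====
def generate_teams_alt (num_teams : Int) : List String :=
  let preset := pvTeamNames
  (PySem.List.pyRange 0 num_teams 1).map (fun i =>
    if i < (preset.length : Int) then
      -- preset[i]: the guard guarantees 0 ≤ i < len(preset), so the default is never used (exact)
      PySem.List.pyGetD preset i ""
    else
      "Team " ++ PySem.Int.toStr (i + 1))

-- ===== PRECONDITION & SPEC =====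
-- For -20 < num_teams < 0, A returns the first 20+num_teams preset names (Python's
-- negative-slice rule), while B returns []; B's value is the intended one, since a
-- negative count of teams to generate means no teams.
def D_generate_teams (num_teams : Int) : Prop := -20 < num_teams ∧ num_teams < 0
instance (num_teams : Int) : Decidable (D_generate_teams num_teams) := by unfold D_generate_teams; infer_instance
def Spec_generate_teams (num_teams : Int) (out : List String) : Prop := ¬ D_generate_teams num_teams → out = generate_teams_alt num_teams
instance (num_teams : Int) (out : List String) : Decidable (Spec_generate_teams num_teams out) := by unfold Spec_generate_teams; infer_instance

def pvDiffWitness_generate_teams : Int := -3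
def pvDiffWitnessOut_generate_teams : (List String) × (List String) :=
  (["Bucks", "Celtics", "76ers", "Raptors", "Nets",
    "Nuggets", "Trail Blazers", "Thunder", "Jazz", "Rockets",
    "Lakers", "Clippers", "Kings", "Spurs", "Timberwolves",
    "Warriors", "Pelicans"], [])

-- ===== CLAIM (what is proved, stated in full; the proofs are below) =====
def Claim_unchanged_generate_teams : Prop := ∀ (num_teams : Int), Dom_generate_teams num_teams → Spec_generate_teams num_teams (generate_teams num_teams)
def Claim_changed_generate_teams : Prop := Dom_generate_teams (pvDiffWitness_generate_teams) ∧ D_generate_teams (pvDiffWitness_generate_teams) ∧ generate_teams (pvDiffWitness_generate_teams) = pvDiffWitnessOut_generate_teams.1 ∧ generate_teams_alt (pvDiffWitness_generate_teams) = pvDiffWitnessOut_generate_teams.2 ∧ pvDiffWitnessOut_generate_teams.1 ≠ pvDiffWitnessOut_generate_teams.2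
def Claim_exact_generate_teams : Prop := ∀ (num_teams : Int), Dom_generate_teams num_teams → D_generate_teams num_teams → generate_teams num_teams ≠ generate_teams_alt num_teams

-- ===== LEMMAS AND PROOFS =====

theorem pvTeamNames_length : pvTeamNames.length = 20 := by decide

-- B on a non-negative count n ≤ 20 is the n-element prefix of the presets.
theorem alt_small (n : Int) (h0 : 0 ≤ n) (h20 : n ≤ 20) :
    generate_teams_alt n = pvTeamNames.take n.toNat := by
  simp only [generate_teams_alt, PySem.List.pyRange_one, sub_zero]
  apply List.ext_getElem
  · simp [pvTeamNames_length]; omega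
  · intro i hi _
    simp only [List.getElem_map, List.getElem_range, List.getElem_take]
    have hlen : ((List.range n.toNat).map (fun k : Nat => (0 : Int) + k)).length = n.toNat := by simp
    have hi' : i < n.toNat := by simpa [hlen] using hi
    have hi20 : i < 20 := by omega
    have : ((0 : Int) + (i : Int)) < (pvTeamNames.length : Int) := by
      simp [pvTeamNames_length]; omega
    simp only [this, if_pos]
    rw [show ((0 : Int) + (i : Int)) = ((i : Nat) : Int) by omega]
    have hi20' : i < pvTeamNames.length := by simp [pvTeamNames_length]; omega
    simp [PySem.List.pyGetD_natCast, List.getD_eq_getElem?_getD, List.getElem?_eq_getElem hi20']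

-- B on a count n > 20 is the presets followed by the numbered names.
theorem alt_big (n : Int) (h : 20 < n) :
    generate_teams_alt n =
      pvTeamNames ++ (PySem.List.pyRange 20 n 1).map (fun i => "Team " ++ PySem.Int.toStr (i + 1)) := by
  simp only [generate_teams_alt]
  rw [PySem.List.pyRange_one_append 0 20 n (by omega) (by omega), List.map_append]
  have h1 : (PySem.List.pyRange 0 20 1).map (fun i : Int =>
      if i < (pvTeamNames.length : Int) then PySem.List.pyGetD pvTeamNames i ""
      else "Team " ++ PySem.Int.toStr (i + 1)) = pvTeamNames := by decide
  have h2 : (PySem.List.pyRange 20 n 1).map (fun i : Int =>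
      if i < (pvTeamNames.length : Int) then PySem.List.pyGetD pvTeamNames i ""
      else "Team " ++ PySem.Int.toStr (i + 1)) =
      (PySem.List.pyRange 20 n 1).map (fun i => "Team " ++ PySem.Int.toStr (i + 1)) := by
    apply List.map_congr_left
    intro i hi
    rw [PySem.List.mem_pyRange_one] at hi
    have : ¬ (i < (pvTeamNames.length : Int)) := by simp [pvTeamNames_length]; omega
    simp [this]
  rw [h1, h2]

-- ===== VERDICT (by name: the statement is the Claim_ definition above) =====
theorem generate_teams_spec : Claim_unchanged_generate_teams := by
  intro n _ hnd
  show generate_teams n = generate_teams_alt n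
  unfold D_generate_teams at hnd
  push Not at hnd
  by_cases h0 : 0 ≤ n
  · by_cases h20 : n ≤ 20
    · rw [alt_small n h0 h20]
      simp only [generate_teams, pvTeamNames_length]
      rw [if_pos (by simpa [pvTeamNames_length] using h20)]
      exact PySem.List.slice_to _ h0
    · push Not at h20
      rw [alt_big n h20]
      simp only [generate_teams]
      rw [if_neg (by simp [pvTeamNames_length]; omega)]
      simp [pvTeamNames_length]
  · -- n < 0 and outside D_: n ≤ -20, both sides are []
    push Not at h0
    have hle : n ≤ -20 := by
      by_cases h : n ≤ -20
      · exact h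
      · exact absurd (hnd (by omega)) (by omega)
    have hB : generate_teams_alt n = [] := by
      simp [generate_teams_alt, PySem.List.pyRange_one_eq_nil (by omega : n ≤ 0)]
    have hA : generate_teams n = [] := by
      simp only [generate_teams]
      rw [if_pos (by simp [pvTeamNames_length]; omega)]
      have hk : n = -(((-n).toNat : Nat) : Int) := by omega
      rw [hk, PySem.List.slice_to_neg_natCast _ _ (by omega)]
      have : pvTeamNames.length - (-n).toNat = 0 := by
        simp [pvTeamNames_length]; omega
      simp [this]
    rw [hA, hB]

theorem generate_teams_changed : Claim_changed_generate_teams := by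
  unfold Claim_changed_generate_teams; decide

theorem generate_teams_tight : Claim_exact_generate_teams := by
  intro n _ hd
  unfold D_generate_teams at hd
  have hB : generate_teams_alt n = [] := by
    simp [generate_teams_alt, PySem.List.pyRange_one_eq_nil (by omega : n ≤ 0)]
  rw [hB]
  simp only [generate_teams]
  rw [if_pos (by simp [pvTeamNames_length]; omega)]
  have hk : n = -(((-n).toNat : Nat) : Int) := by omega
  rw [hk, PySem.List.slice_to_neg_natCast _ _ (by omega)]
  intro hcontra
  have := congrArg List.length hcontra
  simp [pvTeamNames_length] at this
  omega
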